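-- pv_equiv track=rewrite | github.com/victoria-parker/codewars | python-solutions/dashatize-it.py | dashatize
-- ===== SOURCE A (Python) =====
-- def dashatize(n):
--     nums=[*str(n).strip('-')]
--     answer=nums.pop(0)
--     for num in nums:
--         last_char=answer[len(answer)-1]
--         if int(last_char) % 2 == 0 and int(num) % 2 == 0:
--             answer+=num
--         else:
--             answer+='-'+num
--     return answer
-- ===== SOURCE B (Python) =====
-- def dashatize(n):
--     s = str(n).strip('-')
--     return ''.join('-' + d + '-' if int(d) % 2 else d for d in s).replace('--', '-').strip('-')
-- ===== Notes on version B (the rewrite author's own statement) =====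
-- stated objective: idiomatic
-- what changed: Replaces A's stateful loop that compares the accumulated answer's last character with each next digit by a stateless per-digit map (odd digit -> '-d-'), a join, one replace('--','-') normalization pass and a strip('-').
import Mathlib
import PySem

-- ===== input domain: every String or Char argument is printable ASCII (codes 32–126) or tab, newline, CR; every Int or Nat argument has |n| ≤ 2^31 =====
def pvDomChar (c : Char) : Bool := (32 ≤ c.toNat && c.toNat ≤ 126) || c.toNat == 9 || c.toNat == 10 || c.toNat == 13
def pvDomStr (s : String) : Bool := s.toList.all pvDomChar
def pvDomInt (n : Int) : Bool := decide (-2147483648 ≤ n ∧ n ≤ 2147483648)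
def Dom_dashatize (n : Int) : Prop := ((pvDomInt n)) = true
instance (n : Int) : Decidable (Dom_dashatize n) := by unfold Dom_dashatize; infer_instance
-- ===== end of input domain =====

-- B replaces A's stateful loop (comparing the accumulated answer's last char with each digit)
-- by a stateless per-digit map, one replace('--','-') pass and a strip('-'); objective: idiomatic.

-- ===== PORT A =====
-- int(c) for a single char; c is always a decimal digit here (it comes from str(n) for an int n),
-- so ofChars? never returns none and the .getD 0 default is unreachable
def pvIntA (c : Char) : Int := (PySem.Int.ofChars? [c]).getD 0

-- the loop body of A (answer += num  /  answer += '-' + num, keyed on answer's last char)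
def pvStepA (answer : List Char) (num : Char) : List Char :=
  let last_char : Char := (PySem.List.pyGet? answer ((answer.length : Int) - 1)).getD ' '  -- answer is nonempty throughout
  if PySem.Int.mod (pvIntA last_char) 2 == 0 && PySem.Int.mod (pvIntA num) 2 == 0 then
    answer ++ [num]
  else
    answer ++ ('-' :: [num])

def dashatize (n : Int) : String :=
  let nums : List Char := PySem.Chars.stripChars (PySem.Int.toChars n) ['-']
  match nums with
  | [] => ""  -- unreachable for an int argument: str(n).strip('-') is never empty (Python's pop(0) would raise)
  | first :: rest => String.mk (rest.foldl pvStepA [first])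

-- ===== PORT B =====
def pvIntB (c : Char) : Int := (PySem.Int.ofChars? [c]).getD 0  -- int(d); d is always a digit here

def dashatize_alt (n : Int) : String :=
  let s : List Char := PySem.Chars.stripChars (PySem.Int.toChars n) ['-']
  let joined : List Char := s.flatMap (fun d => if PySem.Int.mod (pvIntB d) 2 != 0 then '-' :: d :: ['-'] else [d])
  String.mk (PySem.Chars.stripChars (PySem.Chars.replace joined ['-', '-'] ['-']) ['-'])

-- ===== PRECONDITION & SPEC =====
def Spec_dashatize (n : Int) (out : String) : Prop := out = dashatize_alt n
instance (n : Int) (out : String) : Decidable (Spec_dashatize n out) := by unfold Spec_dashatize; infer_instance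

-- ===== CLAIM (what is proved, stated in full; the proofs are below) =====
def Claim_equal_dashatize : Prop := ∀ (n : Int), Dom_dashatize n → Spec_dashatize n (dashatize n)

-- ===== LEMMAS AND PROOFS =====

def pvEven (c : Char) : Bool := PySem.Int.mod (pvIntA c) 2 == 0

-- what A's loop appends for the remaining digits, given the previous digit a
def pvGA : Char → List Char → List Char
  | _, [] => []
  | a, c :: cs => (if pvEven a && pvEven c then [c] else ['-', c]) ++ pvGA c cs

-- structural form of replace(s, '--', '-')
def pvRep : List Char → List Char
  | [] => []
  | '-' :: '-' :: t => '-' :: pvRep t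
  | c :: t => c :: pvRep t

def pvF (c : Char) : List Char := if pvEven c then [c] else ['-', c, '-']
def pvOptd (c : Char) : List Char := if pvEven c then [] else ['-']

def pvSepOut : Char → List Char → List Char
  | a, [] => pvOptd a
  | a, c :: cs => (if pvEven a && pvEven c then [] else ['-']) ++ c :: pvSepOut c cs

def pvPd (c : Char) : Bool := List.contains ['-'] c

lemma pvPd_eq (c : Char) : pvPd c = (c == '-') := by
  unfold pvPd List.contains
  cases hc : c == '-' <;> simp [List.elem, hc]

lemma optd_even {a : Char} (h : pvEven a = true) : pvOptd a = [] := by rw [pvOptd, if_pos h]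
lemma optd_odd {a : Char} (h : ¬ pvEven a = true) : pvOptd a = ['-'] := by rw [pvOptd, if_neg h]
lemma pvF_even {a : Char} (h : pvEven a = true) : pvF a = [a] := by rw [pvF, if_pos h]
lemma pvF_odd {a : Char} (h : ¬ pvEven a = true) : pvF a = ['-', a, '-'] := by rw [pvF, if_neg h]

lemma rep_nil : pvRep [] = [] := by simp [pvRep]

lemma rep_two_dash (t : List Char) : pvRep ('-' :: '-' :: t) = '-' :: pvRep t := by
  simp [pvRep]

lemma rep_cons (c : Char) (t : List Char) (h : c ≠ '-') : pvRep (c :: t) = c :: pvRep t := by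
  rw [pvRep.eq_def]
  split
  · rename_i heq; exact absurd heq (by simp)
  · rename_i heq; injection heq with h1 _; exact absurd h1 h
  · rename_i heq; injection heq with h1 h2; rw [h1, h2]

lemma rep_dash_cons (c : Char) (t : List Char) (h : c ≠ '-') :
    pvRep ('-' :: c :: t) = '-' :: pvRep (c :: t) := by
  rw [pvRep.eq_def]
  split
  · rename_i heq; exact absurd heq (by simp)
  · rename_i heq
    injection heq with _ h2
    injection h2 with h2 _
    exact absurd h2 h
  · rename_i heq; injection heq with h1 h2; rw [h1, h2]

lemma go_eq_rep : ∀ (fuel : Nat) (l acc : List Char), l.length ≤ fuel →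
    PySem.Chars.replace.go ['-', '-'] ['-'] fuel l acc = acc.reverse ++ pvRep l := by
  intro fuel
  induction fuel with
  | zero =>
    intro l acc h
    have hl : l = [] := by cases l <;> simp_all
    subst hl
    rw [PySem.Chars.replace.go.eq_def]
    simp [rep_nil]
  | succ f ih =>
    intro l acc h
    cases l with
    | nil => rw [PySem.Chars.replace.go.eq_def]; simp [rep_nil]
    | cons c t =>
      rw [PySem.Chars.replace.go.eq_def]
      show (if List.isPrefixOf ['-', '-'] (c :: t) = true then
              PySem.Chars.replace.go ['-', '-'] ['-'] f
                (List.drop (List.length ['-', '-']) (c :: t)) (List.reverse ['-'] ++ acc)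
            else PySem.Chars.replace.go ['-', '-'] ['-'] f t (c :: acc)) =
          acc.reverse ++ pvRep (c :: t)
      by_cases hp : List.isPrefixOf ['-', '-'] (c :: t) = true
      · obtain ⟨u, hu⟩ := List.isPrefixOf_iff_prefix.mp hp
        have ht : c :: t = '-' :: '-' :: u := by rw [← hu]; rfl
        have hlen : u.length ≤ f := by
          have h2 := congrArg List.length ht
          simp only [List.length_cons] at h2 h
          omega
        rw [ht]
        have hpp : List.isPrefixOf ['-', '-'] ('-' :: '-' :: u) = true :=
          List.isPrefixOf_iff_prefix.mpr ⟨u, rfl⟩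
        rw [if_pos hpp]
        rw [show List.drop (List.length ['-', '-']) ('-' :: '-' :: u) = u by simp]
        rw [ih u _ hlen, rep_two_dash]
        simp
      · rw [if_neg hp]
        have hlen : t.length ≤ f := by simp at h; omega
        rw [ih t _ hlen]
        have hr : pvRep (c :: t) = c :: pvRep t := by
          rw [pvRep.eq_def]
          split
          · rename_i heq; exact absurd heq (by simp)
          · rename_i t2 heq
            exact absurd (by rw [heq]; exact List.isPrefixOf_iff_prefix.mpr ⟨t2, rfl⟩ :
              List.isPrefixOf ['-', '-'] (c :: t) = true) hp
          · rename_i heq; injection heq with h1 h2; rw [h1, h2]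
        rw [hr]; simp

lemma replace_eq_rep (l : List Char) :
    PySem.Chars.replace l ['-', '-'] ['-'] = pvRep l := by
  rw [PySem.Chars.replace, if_neg (by simp), go_eq_rep l.length l [] (le_refl _)]
  simp

lemma pvStepA_eq (pre : List Char) (a c : Char) (h : pre.getLast? = some a) :
    pvStepA pre c = pre ++ (if pvEven a && pvEven c then [c] else ['-', c]) := by
  have hne : pre ≠ [] := by intro h0; subst h0; simp at h
  have hlast : (PySem.List.pyGet? pre ((pre.length : Int) - 1)).getD ' ' = a := by
    have h1 : ((pre.length : Int) - 1) = ((pre.length - 1 : Nat) : Int) := by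
      have : 1 ≤ pre.length := List.length_pos_iff.mpr hne
      omega
    rw [h1, PySem.List.pyGet?_natCast, ← List.getLast?_eq_getElem?, h]
    rfl
  unfold pvStepA
  rw [hlast]
  unfold pvEven
  by_cases he : ((PySem.Int.mod (pvIntA a) 2 == 0) && (PySem.Int.mod (pvIntA c) 2 == 0)) = true
  · rw [if_pos he, if_pos he]
  · rw [if_neg he, if_neg he]

lemma foldA_eq : ∀ (L pre : List Char) (a : Char), pre.getLast? = some a →
    L.foldl pvStepA pre = pre ++ pvGA a L := by
  intro L
  induction L with
  | nil => intro pre a _; simp [pvGA]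
  | cons c cs ih =>
    intro pre a h
    rw [List.foldl_cons, pvStepA_eq pre a c h]
    have hblk : (if pvEven a && pvEven c then [c] else ['-', c]).getLast? = some c := by
      by_cases he : (pvEven a && pvEven c) = true
      · rw [if_pos he]; rfl
      · rw [if_neg he]; rfl
    have hlast : (pre ++ (if pvEven a && pvEven c then [c] else ['-', c])).getLast? = some c := by
      rw [List.getLast?_append, hblk]; rfl
    rw [ih _ c hlast, pvGA]
    simp

lemma rep_tail : ∀ (L : List Char) (a : Char), (∀ c ∈ L, c ≠ '-') →
    pvRep (pvOptd a ++ L.flatMap pvF) = pvSepOut a L := by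
  intro L
  induction L with
  | nil =>
    intro a _
    rw [pvSepOut, List.flatMap_nil, List.append_nil]
    by_cases ha : pvEven a = true
    · rw [optd_even ha, rep_nil]
    · rw [optd_odd ha]
      rw [pvRep.eq_def]
      split
      · rename_i heq; exact absurd heq (by simp)
      · rename_i heq; exact absurd heq (by simp)
      · rename_i heq; injection heq with h1 h2; rw [← h1, ← h2, rep_nil]
  | cons c cs ih =>
    intro a hnd
    have hc : c ≠ '-' := hnd c (by simp)
    have hcs : ∀ x ∈ cs, x ≠ '-' := fun x hx => hnd x (by simp [hx])
    have ihc := ih c hcs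
    rw [List.flatMap_cons, pvSepOut]
    by_cases ha : pvEven a = true <;> by_cases hce : pvEven c = true <;>
      [skip;
       (have hcf : pvEven c = false := by simpa using hce);
       (have haf : pvEven a = false := by simpa using ha);
       (have haf : pvEven a = false := by simpa using ha)]
    · -- both even
      rw [optd_even ha, pvF_even hce, List.nil_append, List.singleton_append,
        rep_cons c _ hc, if_pos (by rw [ha, hce]; rfl)]
      rw [optd_even hce, List.nil_append] at ihc
      rw [ihc, List.nil_append]
    · -- a even, c odd
      rw [optd_even ha, pvF_odd hce, List.nil_append, List.cons_append, List.cons_append,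
        List.cons_append, List.nil_append, rep_dash_cons c _ hc, rep_cons c _ hc,
        if_neg (by simp [hcf])]
      rw [optd_odd hce, List.cons_append, List.nil_append] at ihc
      rw [ihc, List.cons_append, List.nil_append]
    · -- a odd, c even
      rw [optd_odd ha, pvF_even hce, List.cons_append, List.nil_append, List.singleton_append,
        rep_dash_cons c _ hc, rep_cons c _ hc, if_neg (by simp [haf])]
      rw [optd_even hce, List.nil_append] at ihc
      rw [ihc, List.cons_append, List.nil_append]
    · -- both odd
      rw [optd_odd ha, pvF_odd hce, List.cons_append, List.nil_append, List.cons_append,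
        List.cons_append, List.cons_append, List.nil_append, rep_two_dash, rep_cons c _ hc,
        if_neg (by simp [haf])]
      rw [optd_odd hce, List.cons_append, List.nil_append] at ihc
      rw [ihc, List.cons_append, List.nil_append]

lemma rep_head (L : List Char) (a : Char) (ha : a ≠ '-') (hnd : ∀ c ∈ L, c ≠ '-') :
    pvRep (pvF a ++ L.flatMap pvF) = pvOptd a ++ a :: pvSepOut a L := by
  have htail := rep_tail L a hnd
  by_cases he : pvEven a = true
  · rw [pvF_even he, List.singleton_append, rep_cons a _ ha, optd_even he, List.nil_append]
    rw [optd_even he, List.nil_append] at htail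
    rw [htail]
  · rw [pvF_odd he, List.cons_append, List.cons_append, List.cons_append, List.nil_append,
      rep_dash_cons a _ ha, rep_cons a _ ha, optd_odd he, List.cons_append, List.nil_append]
    rw [optd_odd he, List.cons_append, List.nil_append] at htail
    rw [htail]

lemma sepOut_decomp : ∀ (L : List Char) (a : Char),
    ∃ e, (e = a ∨ e ∈ L) ∧ pvSepOut a L = pvGA a L ++ pvOptd e := by
  intro L
  induction L with
  | nil => intro a; exact ⟨a, Or.inl rfl, by rw [pvSepOut, pvGA, List.nil_append]⟩
  | cons c cs ih =>
    intro a
    obtain ⟨e, he, heq⟩ := ih c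
    refine ⟨e, Or.inr (by rcases he with h | h <;> simp [h]), ?_⟩
    rw [pvSepOut, heq, pvGA]
    by_cases hb : (pvEven a && pvEven c) = true
    · rw [if_pos hb, if_pos hb]; simp
    · rw [if_neg hb, if_neg hb]; simp

lemma gA_last : ∀ (L : List Char) (a d : Char),
    ∃ t e, d :: pvGA a L = t ++ [e] ∧ (e = d ∨ e ∈ L) := by
  intro L
  induction L with
  | nil => intro a d; exact ⟨[], d, by simp [pvGA], Or.inl rfl⟩
  | cons c cs ih =>
    intro a d
    obtain ⟨t, e, ht, he⟩ := ih c c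
    refine ⟨d :: (if pvEven a && pvEven c then ([] : List Char) else ['-']) ++ t, e, ?_,
      Or.inr (by rcases he with h | h <;> simp [h])⟩
    rw [pvGA]
    by_cases hb : (pvEven a && pvEven c) = true
    · rw [if_pos hb, if_pos hb, List.singleton_append,
        show (c :: pvGA c cs : List Char) = t ++ [e] from ht]
      simp
    · rw [if_neg hb, if_neg hb,
        show (['-', c] : List Char) ++ pvGA c cs = '-' :: (c :: pvGA c cs) from rfl, ht]
      simp

lemma dropWhile_pd_cons (a : Char) (X : List Char) (ha : a ≠ '-') :
    List.dropWhile pvPd (a :: X) = a :: X := by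
  rw [List.dropWhile_cons, if_neg (by rw [pvPd_eq]; simp [ha])]

lemma dropWhile_pd_dash (X : List Char) :
    List.dropWhile pvPd ('-' :: X) = List.dropWhile pvPd X := by
  rw [List.dropWhile_cons, if_pos (by rw [pvPd_eq]; rfl)]

lemma dropWhile_pd_of_all (l : List Char) (h : ∀ c ∈ l, c ≠ '-') :
    List.dropWhile pvPd l = l := by
  cases l with
  | nil => rfl
  | cons x xs => exact dropWhile_pd_cons x xs (h x (by simp))

lemma stripChars_def (s : List Char) :
    PySem.Chars.stripChars s ['-'] =
      (List.dropWhile pvPd (List.dropWhile pvPd s).reverse).reverse := rfl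

lemma strip_final (L : List Char) (a : Char) (ha : a ≠ '-') (hnd : ∀ c ∈ L, c ≠ '-') :
    PySem.Chars.stripChars (pvOptd a ++ a :: pvSepOut a L) ['-'] = a :: pvGA a L := by
  rw [stripChars_def]
  obtain ⟨e, he, heq⟩ := sepOut_decomp L a
  obtain ⟨t, e', ht, he'⟩ := gA_last L a a
  have he'nd : e' ≠ '-' := by
    rcases he' with h | h
    · rw [h]; exact ha
    · exact hnd e' h
  have h1 : List.dropWhile pvPd (pvOptd a ++ a :: pvSepOut a L) = a :: pvSepOut a L := by
    by_cases hae : pvEven a = true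
    · rw [optd_even hae, List.nil_append]
      exact dropWhile_pd_cons a _ ha
    · rw [optd_odd hae, List.cons_append, List.nil_append, dropWhile_pd_dash]
      exact dropWhile_pd_cons a _ ha
  rw [h1]
  have h2 : a :: pvSepOut a L = (t ++ [e']) ++ pvOptd e := by
    rw [heq, ← List.cons_append, ht]
  rw [h2]
  have h3 : List.dropWhile pvPd ((t ++ [e']) ++ pvOptd e).reverse = e' :: t.reverse := by
    by_cases hee : pvEven e = true
    · rw [optd_even hee, List.append_nil, List.reverse_append, List.reverse_cons,
        List.reverse_nil, List.nil_append, List.singleton_append]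
      exact dropWhile_pd_cons e' _ he'nd
    · rw [optd_odd hee, List.reverse_append, show (['-'] : List Char).reverse = ['-'] from rfl,
        List.reverse_append, List.reverse_cons, List.reverse_nil, List.nil_append,
        List.singleton_append, List.singleton_append, dropWhile_pd_dash]
      exact dropWhile_pd_cons e' _ he'nd
  rw [h3, show (e' :: t.reverse).reverse = t ++ [e'] by simp, ← ht]

lemma digitChar_ne_dash (m : Nat) : Nat.digitChar m ≠ '-' := by
  intro h
  by_cases h16 : m < 16
  · interval_cases m <;> exact absurd h (by decide)
  · have hstar : Nat.digitChar m = '*' := by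
      unfold Nat.digitChar
      rw [if_neg (by omega), if_neg (by omega), if_neg (by omega), if_neg (by omega),
        if_neg (by omega), if_neg (by omega), if_neg (by omega), if_neg (by omega),
        if_neg (by omega), if_neg (by omega), if_neg (by omega), if_neg (by omega),
        if_neg (by omega), if_neg (by omega), if_neg (by omega), if_neg (by omega)]
    rw [hstar] at h
    exact absurd h (by decide)

lemma toDigitsCore_ne_dash : ∀ (f n : Nat) (l : List Char), (∀ c ∈ l, c ≠ '-') →
    ∀ c ∈ Nat.toDigitsCore 10 f n l, c ≠ '-' := by
  intro f
  induction f with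
  | zero => intro n l hl; rw [Nat.toDigitsCore]; exact hl
  | succ f ih =>
    intro n l hl
    rw [Nat.toDigitsCore]
    have hdl : ∀ c ∈ (n % 10).digitChar :: l, c ≠ '-' := by
      intro c hc
      rw [List.mem_cons] at hc
      rcases hc with h | h
      · rw [h]; exact digitChar_ne_dash _
      · exact hl c h
    split
    · exact hdl
    · exact ih _ _ hdl

lemma toDigitsCore_ne_nil_aux : ∀ (f n : Nat) (l : List Char), l ≠ [] →
    Nat.toDigitsCore 10 f n l ≠ [] := by
  intro f
  induction f with
  | zero => intro n l hl; rw [Nat.toDigitsCore]; exact hl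
  | succ f ih =>
    intro n l hl
    rw [Nat.toDigitsCore]
    split
    · simp
    · exact ih _ _ (by simp)

lemma toDigits_ne_nil (m : Nat) : Nat.toDigits 10 m ≠ [] := by
  rw [Nat.toDigits, Nat.toDigitsCore]
  split
  · simp
  · exact toDigitsCore_ne_nil_aux _ _ _ (by simp)

lemma toDigits_ne_dash (m : Nat) : ∀ c ∈ Nat.toDigits 10 m, c ≠ '-' := by
  rw [Nat.toDigits]
  exact toDigitsCore_ne_dash _ _ _ (by intro c hc; simp at hc)

lemma stripped_eq (n : Int) :
    PySem.Chars.stripChars (PySem.Int.toChars n) ['-'] =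
      Nat.toDigits 10 (if n < 0 then n.natAbs else n.toNat) := by
  rw [PySem.Int.toChars]
  by_cases hn : n < 0
  · rw [if_pos hn, if_pos hn, stripChars_def, dropWhile_pd_dash,
      dropWhile_pd_of_all _ (toDigits_ne_dash _),
      dropWhile_pd_of_all _ (by intro c hc; rw [List.mem_reverse] at hc
                                exact toDigits_ne_dash _ c hc)]
    simp
  · rw [if_neg hn, if_neg hn, stripChars_def,
      dropWhile_pd_of_all _ (toDigits_ne_dash _),
      dropWhile_pd_of_all _ (by intro c hc; rw [List.mem_reverse] at hc
                                exact toDigits_ne_dash _ c hc)]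
    simp

lemma flatB_eq :
    (fun d => if PySem.Int.mod (pvIntB d) 2 != 0 then '-' :: d :: ['-'] else [d]) = pvF := by
  funext d
  have hcond : (PySem.Int.mod (pvIntB d) 2 != 0) = !pvEven d := rfl
  rw [hcond, pvF]
  cases he : pvEven d <;> simp

-- ===== VERDICT (by name: the statement is the Claim_ definition above) =====
theorem dashatize_spec : Claim_equal_dashatize := by
  intro n _
  unfold Spec_dashatize
  show dashatize n = dashatize_alt n
  unfold dashatize dashatize_alt
  rw [stripped_eq]
  generalize hds : Nat.toDigits 10 (if n < 0 then n.natAbs else n.toNat) = ds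
  have hne : ds ≠ [] := hds ▸ toDigits_ne_nil _
  have hnd : ∀ c ∈ ds, c ≠ '-' := hds ▸ toDigits_ne_dash _
  cases ds with
  | nil => exact absurd rfl hne
  | cons a L =>
    have ha : a ≠ '-' := hnd a (by simp)
    have hL : ∀ c ∈ L, c ≠ '-' := fun c hc => hnd c (by simp [hc])
    show String.mk (L.foldl pvStepA [a]) = _
    rw [foldA_eq L [a] a rfl, flatB_eq]
    show String.mk ([a] ++ pvGA a L) =
      String.mk (PySem.Chars.stripChars
        (PySem.Chars.replace (List.flatMap pvF (a :: L)) ['-', '-'] ['-']) ['-'])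
    rw [List.flatMap_cons, replace_eq_rep, rep_head L a ha hL, strip_final L a ha hL]
    simp
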